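-- pv_equiv track=rewrite | github.com/ariya/phantomjs | src/qt/qtwebkit/Tools/Scripts/webkitpy/port/builders.py | builder_name_for_port_name
-- ===== SOURCE A (Python) =====
-- _exact_matches = {
--     # These builders are on build.webkit.org.
--     "Apple MountainLion Release WK1 (Tests)": {"port_name": "mac-mountainlion", "is_debug": False, "rebaseline_override_dir": "mac"},
--     "Apple MountainLion Debug WK1 (Tests)": {"port_name": "mac-mountainlion", "is_debug": True, "rebaseline_override_dir": "mac"},
--     "Apple MountainLion Release WK2 (Tests)": {"port_name": "mac-mountainlion-wk2", "is_debug": False, "rebaseline_override_dir": "mac"},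
--     "Apple MountainLion Debug WK2 (Tests)": {"port_name": "mac-mountainlion-wk2", "is_debug": True, "rebaseline_override_dir": "mac"},
--     "Apple Lion Release WK1 (Tests)": {"port_name": "mac-lion", "is_debug": False},
--     "Apple Lion Debug WK1 (Tests)": {"port_name": "mac-lion", "is_debug": True},
--     "Apple Lion Release WK2 (Tests)": {"port_name": "mac-lion-wk2", "is_debug": False},
--     "Apple Lion Debug WK2 (Tests)": {"port_name": "mac-lion-wk2", "is_debug": True},
--
--     "Apple Win XP Debug (Tests)": {"port_name": "win-xp", "is_debug": True},
--     # FIXME: Remove rebaseline_override_dir once there is an Apple buildbot that corresponds to platform/win.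
--     "Apple Win 7 Release (Tests)": {"port_name": "win-7sp0", "is_debug": False, "rebaseline_override_dir": "win"},
--
--     "GTK Linux 32-bit Release": {"port_name": "gtk", "is_debug": False},
--     "GTK Linux 64-bit Debug": {"port_name": "gtk", "is_debug": True},
--     "GTK Linux 64-bit Release": {"port_name": "gtk", "is_debug": False},
--     "GTK Linux 64-bit Release WK2 (Tests)": {"port_name": "gtk-wk2", "is_debug": False},
--
--     # FIXME: Remove rebaseline_override_dir once there are Qt bots for all the platform/qt-* directories.
--     "Qt Linux Release": {"port_name": "qt-linux", "is_debug": False, "rebaseline_override_dir": "qt"},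
--
--     "EFL Linux 64-bit Release": {"port_name": "efl", "is_debug": False},
--     "EFL Linux 64-bit Release WK2": {"port_name": "efl-wk2", "is_debug": False},
--     "EFL Linux 64-bit Debug WK2": {"port_name": "efl-wk2", "is_debug": True},
-- }
--
-- def builder_name_for_port_name(target_port_name):
--     debug_builder_name = None
--     for builder_name, builder_info in _exact_matches.items():
--         if builder_info['port_name'] == target_port_name:
--             if builder_info['is_debug']:
--                 debug_builder_name = builder_name
--             else:
--                 return builder_name
--     return debug_builder_name
-- ===== SOURCE B (Python) =====
-- _exact_matches = {
--     "Apple MountainLion Release WK1 (Tests)": {"port_name": "mac-mountainlion", "is_debug": False, "rebaseline_override_dir": "mac"},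
--     "Apple MountainLion Debug WK1 (Tests)": {"port_name": "mac-mountainlion", "is_debug": True, "rebaseline_override_dir": "mac"},
--     "Apple MountainLion Release WK2 (Tests)": {"port_name": "mac-mountainlion-wk2", "is_debug": False, "rebaseline_override_dir": "mac"},
--     "Apple MountainLion Debug WK2 (Tests)": {"port_name": "mac-mountainlion-wk2", "is_debug": True, "rebaseline_override_dir": "mac"},
--     "Apple Lion Release WK1 (Tests)": {"port_name": "mac-lion", "is_debug": False},
--     "Apple Lion Debug WK1 (Tests)": {"port_name": "mac-lion", "is_debug": True},
--     "Apple Lion Release WK2 (Tests)": {"port_name": "mac-lion-wk2", "is_debug": False},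
--     "Apple Lion Debug WK2 (Tests)": {"port_name": "mac-lion-wk2", "is_debug": True},
--     "Apple Win XP Debug (Tests)": {"port_name": "win-xp", "is_debug": True},
--     "Apple Win 7 Release (Tests)": {"port_name": "win-7sp0", "is_debug": False, "rebaseline_override_dir": "win"},
--     "GTK Linux 32-bit Release": {"port_name": "gtk", "is_debug": False},
--     "GTK Linux 64-bit Debug": {"port_name": "gtk", "is_debug": True},
--     "GTK Linux 64-bit Release": {"port_name": "gtk", "is_debug": False},
--     "GTK Linux 64-bit Release WK2 (Tests)": {"port_name": "gtk-wk2", "is_debug": False},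
--     "Qt Linux Release": {"port_name": "qt-linux", "is_debug": False, "rebaseline_override_dir": "qt"},
--     "EFL Linux 64-bit Release": {"port_name": "efl", "is_debug": False},
--     "EFL Linux 64-bit Release WK2": {"port_name": "efl-wk2", "is_debug": False},
--     "EFL Linux 64-bit Debug WK2": {"port_name": "efl-wk2", "is_debug": True},
-- }
--
-- def builder_name_for_port_name(target_port_name):
--     releases = [name for name, info in _exact_matches.items()
--                 if info['port_name'] == target_port_name and not info['is_debug']]
--     if releases:
--         return releases[0]
--     debugs = [name for name, info in _exact_matches.items()
--               if info['port_name'] == target_port_name and info['is_debug']]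
--     return debugs[-1] if debugs else None
-- ===== Notes on version B (the rewrite author's own statement) =====
-- stated objective: simpler
-- what changed: Replaces the interleaved scan with a debug-accumulator and mid-loop early return by two declarative selection passes: take the first matching release builder, otherwise the last matching debug builder, otherwise None.
import Mathlib
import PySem

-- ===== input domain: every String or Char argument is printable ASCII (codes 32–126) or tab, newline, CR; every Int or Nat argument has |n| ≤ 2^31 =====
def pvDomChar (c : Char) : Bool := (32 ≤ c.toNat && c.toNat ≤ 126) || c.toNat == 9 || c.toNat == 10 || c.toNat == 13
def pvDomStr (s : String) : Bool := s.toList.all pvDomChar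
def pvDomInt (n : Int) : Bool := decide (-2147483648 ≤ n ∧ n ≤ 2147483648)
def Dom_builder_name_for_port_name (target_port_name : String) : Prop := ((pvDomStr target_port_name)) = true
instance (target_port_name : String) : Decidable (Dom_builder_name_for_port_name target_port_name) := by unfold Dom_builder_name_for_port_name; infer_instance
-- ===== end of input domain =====

-- B is a simpler decomposition: two declarative selection passes (first matching release,
-- else last matching debug) instead of A's accumulator loop with a mid-loop early return.

-- The module-level _exact_matches table, flattened to (builder_name, port_name, is_debug)
-- in dict insertion order (rebaseline_override_dir is never read by this function).
def pvExactMatches : List (String × String × Bool) :=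
  [ ("Apple MountainLion Release WK1 (Tests)", "mac-mountainlion", false),
    ("Apple MountainLion Debug WK1 (Tests)", "mac-mountainlion", true),
    ("Apple MountainLion Release WK2 (Tests)", "mac-mountainlion-wk2", false),
    ("Apple MountainLion Debug WK2 (Tests)", "mac-mountainlion-wk2", true),
    ("Apple Lion Release WK1 (Tests)", "mac-lion", false),
    ("Apple Lion Debug WK1 (Tests)", "mac-lion", true),
    ("Apple Lion Release WK2 (Tests)", "mac-lion-wk2", false),
    ("Apple Lion Debug WK2 (Tests)", "mac-lion-wk2", true),
    ("Apple Win XP Debug (Tests)", "win-xp", true),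
    ("Apple Win 7 Release (Tests)", "win-7sp0", false),
    ("GTK Linux 32-bit Release", "gtk", false),
    ("GTK Linux 64-bit Debug", "gtk", true),
    ("GTK Linux 64-bit Release", "gtk", false),
    ("GTK Linux 64-bit Release WK2 (Tests)", "gtk-wk2", false),
    ("Qt Linux Release", "qt-linux", false),
    ("EFL Linux 64-bit Release", "efl", false),
    ("EFL Linux 64-bit Release WK2", "efl-wk2", false),
    ("EFL Linux 64-bit Debug WK2", "efl-wk2", true) ]

-- ===== PORT A =====
-- A's for-loop with the debug_builder_name accumulator and the early return on a release match.
def pvLoopA (target : String) : List (String × String × Bool) → Option String → Option String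
  | [], acc => acc
  | (name, port, dbg) :: rest, acc =>
    if port = target then
      if dbg then pvLoopA target rest (some name)
      else some name
    else pvLoopA target rest acc

def builder_name_for_port_name (target_port_name : String) : Option String :=
  pvLoopA target_port_name pvExactMatches none

-- ===== PORT B =====
-- B: releases[0] if any, else debugs[-1] if any, else None.
def builder_name_for_port_name_alt (target_port_name : String) : Option String :=
  let releases := (pvExactMatches.filter
    (fun e => e.2.1 == target_port_name && !e.2.2)).map (fun e => e.1)
  match releases.head? with
  | some n => some n
  | none =>
    let debugs := (pvExactMatches.filter
      (fun e => e.2.1 == target_port_name && e.2.2)).map (fun e => e.1)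
    debugs.getLast?

-- ===== PRECONDITION & SPEC =====
def Spec_builder_name_for_port_name (target_port_name : String) (out : Option String) : Prop := out = builder_name_for_port_name_alt target_port_name
instance (target_port_name : String) (out : Option String) : Decidable (Spec_builder_name_for_port_name target_port_name out) := by unfold Spec_builder_name_for_port_name; infer_instance

-- ===== CLAIM (what is proved, stated in full; the proofs are below) =====
def Claim_equal_builder_name_for_port_name : Prop := ∀ (target_port_name : String), Dom_builder_name_for_port_name target_port_name → Spec_builder_name_for_port_name target_port_name (builder_name_for_port_name target_port_name)

-- ===== LEMMAS AND PROOFS =====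

-- A's loop over any table equals: first release match, else last debug match, else the accumulator.
theorem pvLoopA_eq (target : String) (l : List (String × String × Bool)) (acc : Option String) :
    pvLoopA target l acc =
      match ((l.filter (fun e => e.2.1 == target && !e.2.2)).map (fun e => e.1)).head? with
      | some n => some n
      | none =>
        match ((l.filter (fun e => e.2.1 == target && e.2.2)).map (fun e => e.1)).getLast? with
        | some n => some n
        | none => acc := by
  induction l generalizing acc with
  | nil => simp [pvLoopA]
  | cons hd tl ih =>
    obtain ⟨name, port, dbg⟩ := hd
    by_cases hp : port = target
    · cases dbg with
      | false =>
        simp [pvLoopA, hp]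
      | true =>
        simp only [pvLoopA, hp, if_true, ih, List.filter_cons]
        simp only [beq_self_eq_true, Bool.not_true, Bool.and_false,
          Bool.false_eq_true, if_false, Bool.and_true, if_true, List.map_cons]
        cases hrel : ((tl.filter (fun e => e.2.1 == target && !e.2.2)).map (fun e => e.1)).head? with
        | some n => simp
        | none =>
          cases hdbg : ((tl.filter (fun e => e.2.1 == target && e.2.2)).map (fun e => e.1)).getLast? with
          | some n => simp [List.getLast?_cons, hdbg]
          | none =>
            simp [List.getLast?_cons, hdbg]
    · simp [pvLoopA, hp, beq_iff_eq, ih]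

-- ===== VERDICT (by name: the statement is the Claim_ definition above) =====
theorem builder_name_for_port_name_spec : Claim_equal_builder_name_for_port_name := by
  intro t _
  unfold Spec_builder_name_for_port_name builder_name_for_port_name builder_name_for_port_name_alt
  rw [pvLoopA_eq]
  cases h : ((pvExactMatches.filter (fun e => e.2.1 == t && !e.2.2)).map (fun e => e.1)).head? with
  | some n => simp only [h]
  | none =>
    simp only [h]
    cases ((pvExactMatches.filter (fun e => e.2.1 == t && e.2.2)).map (fun e => e.1)).getLast? <;> rfl
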